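-- pv_equiv track=rewrite | github.com/Hanryi/MarkerTech | mBP-Seq/MethFraction.py | mut_locator
-- ===== SOURCE A (Python) =====
-- def mut_locator(seg_seq, leader_pos, mut_len, pos_arr):
--     """ Locate the sequence in mutation area.
--
--     The return sequence can be Ref, Alt or any other seq. But only the Ref and
--     Alt will be used for calculate frequency (Freq = Alt / (Ref + Alt)) after
--     UMI deduplication.
--
--     :param seg_seq: (str)
--         segment sequence in bam
--     :param leader_pos: (int)
--         position index of the first base in the mutation identifier
--     :param mut_len: (int)
--         maximum length between Ref and Alt
--     :param pos_arr: (tuple list)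
--         each binary tuple shows the binary position of current base that first
--         int element means reads position and second int element means reference
--         position
--
--     :return: (str)
--         mutation sequence in the given mutation length
--     """
--     # Locate the position of leader base
--     mut_leader = None
--     for pos in pos_arr:
--         if pos[0] is not None and pos[1] == leader_pos:
--             mut_leader = pos_arr.index(pos)
--             break
--     # Avoid invalid leader base (just in case)
--     if mut_leader is None:
--         return None
--
--     # Mutation sequence
--     mut_seq = ''
--     mut_arr = pos_arr[mut_leader: mut_leader + mut_len]
--     for mut in mut_arr:
--         if mut[0] is None:
--             continue
--         mut_seq += seg_seq[mut[0]]
--     return mut_seq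
-- ===== SOURCE B (Python) =====
-- def mut_locator(seg_seq, leader_pos, mut_len, pos_arr):
--     """Single fused pass: scan for the leader, then consume up to mut_len
--     entries with a countdown counter, collecting chars; no .index rescan,
--     no slice allocation."""
--     remaining = None
--     chars = []
--     for pos in pos_arr:
--         if remaining is None:
--             if pos[0] is None or pos[1] != leader_pos:
--                 continue
--             remaining = mut_len
--         if remaining <= 0:
--             break
--         remaining -= 1
--         if pos[0] is not None:
--             chars.append(seg_seq[pos[0]])
--     if remaining is None:
--         return None
--     return ''.join(chars)
-- ===== Notes on version B (the rewrite author's own statement) =====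
-- stated objective: alternative
-- what changed: B fuses A's three phases (leader-find loop + pos_arr.index rescan + slice-then-filter loop) into one pass over pos_arr with a countdown counter and a char accumulator.
-- intended difference: On inputs with mut_len < 0 where a leader is found and Python's slice end wraps to a non-empty tail window containing a read position, A returns characters from that accidental window while B returns '', the intended value since a non-positive mutation length selects no bases. — e.g. on mut_locator("AC", 0, -1, [(some 0, some 0), (some 1, some 0)]): A returns some "A", B returns some ""
import Mathlib
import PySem

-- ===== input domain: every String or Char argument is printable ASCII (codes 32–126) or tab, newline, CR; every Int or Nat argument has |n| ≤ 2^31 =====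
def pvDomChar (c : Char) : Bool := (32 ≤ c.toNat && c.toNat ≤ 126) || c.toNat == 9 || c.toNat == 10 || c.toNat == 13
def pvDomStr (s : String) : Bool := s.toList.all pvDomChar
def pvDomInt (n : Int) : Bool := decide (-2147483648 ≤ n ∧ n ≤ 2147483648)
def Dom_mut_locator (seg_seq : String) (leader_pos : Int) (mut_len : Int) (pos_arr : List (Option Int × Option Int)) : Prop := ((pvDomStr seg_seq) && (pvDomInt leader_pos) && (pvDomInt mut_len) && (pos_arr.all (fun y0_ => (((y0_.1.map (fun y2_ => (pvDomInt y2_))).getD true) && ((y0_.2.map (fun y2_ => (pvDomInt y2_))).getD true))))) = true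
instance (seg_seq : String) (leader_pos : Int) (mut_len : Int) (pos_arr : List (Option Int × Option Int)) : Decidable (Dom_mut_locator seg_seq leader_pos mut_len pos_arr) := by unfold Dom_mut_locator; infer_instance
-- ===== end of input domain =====

-- B replaces A's three phases (leader-find loop + pos_arr.index rescan + slice-then-filter loop) by one
-- fused pass with a countdown counter; on negative mut_len B returns '' instead of A's wrapped-slice value (see D_).

-- the leader condition `pos[0] is not None and pos[1] == leader_pos`, shared verbatim by both sources
def pvCond (leader_pos : Int) (p : Option Int × Option Int) : Bool :=
  p.1.isSome && p.2 == some leader_pos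

-- ===== PORT A =====
-- `for pos in pos_arr: if <cond>: mut_leader = pos_arr.index(pos); break`  — the found element
def pvAFind (leader_pos : Int) : List (Option Int × Option Int) → Option (Option Int × Option Int)
  | [] => none
  | p :: rest => if pvCond leader_pos p then some p else pvAFind leader_pos rest

-- `for mut in mut_arr: if mut[0] is None: continue; mut_seq += seg_seq[mut[0]]`
-- (none acc / failed pyGet? = the IndexError Python would raise; excluded by Pre_)
def pvAFold (seg : List Char) (acc : Option String) (w : List (Option Int × Option Int)) : Option String :=
  w.foldl (fun a m =>
    match m.1 with
    | none => a
    | some i =>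
      match a, PySem.List.pyGet? seg i with
      | some s, some c => some (s.push c)
      | _, _ => none) acc

def mut_locator (seg_seq : String) (leader_pos : Int) (mut_len : Int) (pos_arr : List (Option Int × Option Int)) : Option String :=
  match pvAFind leader_pos pos_arr with
  | none => none
  | some pos =>
    match PySem.List.index? pos_arr pos with
    | none => none
    | some j =>
      pvAFold seg_seq.toList (some "")
        (PySem.List.slice pos_arr (some (j : Int)) (some ((j : Int) + mut_len)))

-- ===== PORT B =====
-- consuming phase: `remaining -= 1; if pos[0] is not None: chars.append(seg_seq[pos[0]])`
def pvBTake (seg : List Char) (r : Int) (acc : String) : List (Option Int × Option Int) → Option String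
  | [] => some acc
  | p :: rest =>
    if r ≤ 0 then some acc
    else
      match p.1 with
      | none => pvBTake seg (r - 1) acc rest
      | some i =>
        match PySem.List.pyGet? seg i with
        | some c => pvBTake seg (r - 1) (acc.push c) rest
        | none => none

-- scanning phase: skip until the leader condition first holds, then hand the rest to pvBTake
def pvBScan (seg : List Char) (leader_pos : Int) (mut_len : Int) : List (Option Int × Option Int) → Option String
  | [] => none
  | p :: rest =>
    if pvCond leader_pos p then pvBTake seg mut_len "" (p :: rest)
    else pvBScan seg leader_pos mut_len rest

def mut_locator_alt (seg_seq : String) (leader_pos : Int) (mut_len : Int) (pos_arr : List (Option Int × Option Int)) : Option String :=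
  pvBScan seg_seq.toList leader_pos mut_len pos_arr

-- ===== PRECONDITION & SPEC =====
-- Pre_ excludes exactly the inputs on which Python A raises IndexError: some entry of the actual
-- slice window (start = first leader match j, stop = Python-clamped j+mut_len) has a read position
-- outside the valid index range of seg_seq.
-- Bool helper for Pre_: every entry of pos_arr[j : clamp(j+mut_len)] with a read position has it in range
def pvWindowOk (seg_seq : String) (mut_len : Int) (pos_arr : List (Option Int × Option Int)) (j : Nat) : Bool :=
  (List.range pos_arr.length).all fun k =>
    !(decide (j ≤ k) && decide ((k : Int) < PySem.List.clampIdx pos_arr.length ((j : Int) + mut_len))) ||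
    (pos_arr.getD k (none, none)).1.all
      (fun i => -(seg_seq.toList.length : Int) ≤ i && i < (seg_seq.toList.length : Int))

def Pre_mut_locator (seg_seq : String) (leader_pos : Int) (mut_len : Int) (pos_arr : List (Option Int × Option Int)) : Prop :=
  ∀ j, j < pos_arr.length → pvCond leader_pos (pos_arr.getD j (none, none)) = true →
    (∀ k, k < j → pvCond leader_pos (pos_arr.getD k (none, none)) = false) →
    pvWindowOk seg_seq mut_len pos_arr j = true
instance (seg_seq : String) (leader_pos : Int) (mut_len : Int) (pos_arr : List (Option Int × Option Int)) : Decidable (Pre_mut_locator seg_seq leader_pos mut_len pos_arr) := by unfold Pre_mut_locator; infer_instance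

def pvWitness_mut_locator : String × Int × Int × (List (Option Int × Option Int)) :=
  ("AC", 0, 1, [(some 0, some 0)])

-- On inputs with mut_len < 0 and a found leader whose wrapped window pos_arr[j : len+j+mut_len] holds a read
-- position, A returns characters from that accidental tail window (Python slice-end wraparound), while B returns
-- '' — the intended value, since a non-positive mutation length selects no bases.
def D_mut_locator (_seg_seq : String) (leader_pos : Int) (mut_len : Int) (pos_arr : List (Option Int × Option Int)) : Prop :=
  (List.findIdx? (pvCond leader_pos) pos_arr).any
    (fun (j : Nat) => decide ((j : Int) + mut_len < 0) &&
      ((pos_arr.drop j).take ((pos_arr.length : Int) + mut_len).toNat).any (·.1.isSome)) = true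
instance (seg_seq : String) (leader_pos : Int) (mut_len : Int) (pos_arr : List (Option Int × Option Int)) : Decidable (D_mut_locator seg_seq leader_pos mut_len pos_arr) := by unfold D_mut_locator; infer_instance

def Spec_mut_locator (seg_seq : String) (leader_pos : Int) (mut_len : Int) (pos_arr : List (Option Int × Option Int)) (out : Option String) : Prop := ¬ D_mut_locator seg_seq leader_pos mut_len pos_arr → out = mut_locator_alt seg_seq leader_pos mut_len pos_arr
instance (seg_seq : String) (leader_pos : Int) (mut_len : Int) (pos_arr : List (Option Int × Option Int)) (out : Option String) : Decidable (Spec_mut_locator seg_seq leader_pos mut_len pos_arr out) := by unfold Spec_mut_locator; infer_instance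

def pvDiffWitness_mut_locator : String × Int × Int × (List (Option Int × Option Int)) :=
  ("AC", 0, -1, [(some 0, some 0), (some 1, some 0)])
def pvDiffWitnessOut_mut_locator : (Option String) × (Option String) := (some "A", some "")

-- ===== CLAIM (what is proved, stated in full; the proofs are below) =====
def Claim_unchanged_mut_locator : Prop := ∀ (seg_seq : String) (leader_pos : Int) (mut_len : Int) (pos_arr : List (Option Int × Option Int)), Dom_mut_locator seg_seq leader_pos mut_len pos_arr → Pre_mut_locator seg_seq leader_pos mut_len pos_arr → Spec_mut_locator seg_seq leader_pos mut_len pos_arr (mut_locator seg_seq leader_pos mut_len pos_arr)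
def Claim_changed_mut_locator : Prop := Dom_mut_locator (pvDiffWitness_mut_locator.1) (pvDiffWitness_mut_locator.2.1) (pvDiffWitness_mut_locator.2.2.1) (pvDiffWitness_mut_locator.2.2.2) ∧ Pre_mut_locator (pvDiffWitness_mut_locator.1) (pvDiffWitness_mut_locator.2.1) (pvDiffWitness_mut_locator.2.2.1) (pvDiffWitness_mut_locator.2.2.2) ∧ D_mut_locator (pvDiffWitness_mut_locator.1) (pvDiffWitness_mut_locator.2.1) (pvDiffWitness_mut_locator.2.2.1) (pvDiffWitness_mut_locator.2.2.2) ∧ mut_locator (pvDiffWitness_mut_locator.1) (pvDiffWitness_mut_locator.2.1) (pvDiffWitness_mut_locator.2.2.1) (pvDiffWitness_mut_locator.2.2.2) = pvDiffWitnessOut_mut_locator.1 ∧ mut_locator_alt (pvDiffWitness_mut_locator.1) (pvDiffWitness_mut_locator.2.1) (pvDiffWitness_mut_locator.2.2.1) (pvDiffWitness_mut_locator.2.2.2) = pvDiffWitnessOut_mut_locator.2 ∧ pvDiffWitnessOut_mut_locator.1 ≠ pvDiffWitnessOut_mut_locator.2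
def Claim_exact_mut_locator : Prop := ∀ (seg_seq : String) (leader_pos : Int) (mut_len : Int) (pos_arr : List (Option Int × Option Int)), Dom_mut_locator seg_seq leader_pos mut_len pos_arr → Pre_mut_locator seg_seq leader_pos mut_len pos_arr → D_mut_locator seg_seq leader_pos mut_len pos_arr → mut_locator seg_seq leader_pos mut_len pos_arr ≠ mut_locator_alt seg_seq leader_pos mut_len pos_arr

-- ===== LEMMAS AND PROOFS =====

-- clampIdx / slice unfolded to drop/take arithmetic
theorem pvClampDef (n : Nat) (b : Int) :
    PySem.List.clampIdx n b = (if b < 0 then (b + n).toNat else min b.toNat n) := by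
  unfold PySem.List.clampIdx
  split
  · split <;> omega
  · rfl

theorem pvSliceDef {α : Type} (xs : List α) (a b : Int) :
    PySem.List.slice xs (some a) (some b) =
      (xs.drop (PySem.List.clampIdx xs.length a)).take
        (PySem.List.clampIdx xs.length b - PySem.List.clampIdx xs.length a) := by
  simp [PySem.List.slice]

-- A's fold keeps a none accumulator
theorem pvFoldNone (seg : List Char) (w : List (Option Int × Option Int)) :
    pvAFold seg none w = none := by
  induction w with
  | nil => rfl
  | cons p rest ih =>
    simp only [pvAFold, List.foldl_cons] at *
    cases hp : p.1 with
    | none => simpa [hp] using ih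
    | some i => cases PySem.List.pyGet? seg i <;> simpa [hp] using ih

-- B's take with a non-positive counter returns the accumulator unchanged
theorem pvTakeNonpos (seg : List Char) (r : Int) (acc : String)
    (w : List (Option Int × Option Int)) (h : r ≤ 0) : pvBTake seg r acc w = some acc := by
  cases w with
  | nil => rfl
  | cons p rest => simp [pvBTake, h]

-- for a non-negative counter, B's take equals A's fold over the r-entry prefix
theorem pvTakePos (seg : List Char) (w : List (Option Int × Option Int)) :
    ∀ (r : Int) (acc : String), 0 ≤ r →
      pvAFold seg (some acc) (w.take r.toNat) = pvBTake seg r acc w := by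
  induction w with
  | nil => intro r acc _; cases r.toNat <;> rfl
  | cons p rest ih =>
    intro r acc hr
    by_cases hr0 : r ≤ 0
    · have : r.toNat = 0 := by omega
      rw [this]
      simpa [pvAFold] using (pvTakeNonpos seg r acc (p :: rest) hr0).symm
    · have hpos : r.toNat = (r - 1).toNat + 1 := by omega
      rw [hpos, List.take_succ_cons]
      simp only [pvAFold, List.foldl_cons, pvBTake, if_neg hr0]
      cases hp : p.1 with
      | none =>
        simpa [hp, pvAFold] using ih (r - 1) acc (by omega)
      | some i =>
        cases hg : PySem.List.pyGet? seg i with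
        | none => simpa [hp, hg, pvAFold] using pvFoldNone seg (rest.take (r - 1).toNat)
        | some c => simpa [hp, hg, pvAFold] using ih (r - 1) (acc.push c) (by omega)

-- A's fold over a window containing no read positions returns the accumulator
theorem pvFoldSkip (seg : List Char) (w : List (Option Int × Option Int)) (acc : String)
    (h : ∀ m ∈ w, m.1 = none) : pvAFold seg (some acc) w = some acc := by
  induction w with
  | nil => rfl
  | cons p rest ih =>
    have hp : p.1 = none := h p (by simp)
    simp only [pvAFold, List.foldl_cons, hp]
    exact ih (fun m hm => h m (by simp [hm]))

-- when every read position of the window is gettable, A's fold appends exactly those characters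
theorem pvFoldChars (seg : List Char) (w : List (Option Int × Option Int)) :
    ∀ acc : String,
      (∀ m ∈ w, ∀ i, m.1 = some i → (PySem.List.pyGet? seg i).isSome = true) →
      ∃ s, pvAFold seg (some acc) w = some s ∧
        s.toList = acc.toList ++ w.filterMap (fun m => m.1.bind (PySem.List.pyGet? seg)) := by
  induction w with
  | nil => intro acc _; exact ⟨acc, rfl, by simp⟩
  | cons p rest ih =>
    intro acc h
    cases hp : p.1 with
    | none =>
      obtain ⟨s, hs, hl⟩ := ih acc (fun m hm => h m (by simp [hm]))
      exact ⟨s, by simpa [pvAFold, hp] using hs, by simp [hp, hl]⟩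
    | some i =>
      have := h p (by simp) i hp
      cases hg : PySem.List.pyGet? seg i with
      | none => simp [hg] at this
      | some c =>
        obtain ⟨s, hs, hl⟩ := ih (acc.push c) (fun m hm => h m (by simp [hm]))
        refine ⟨s, by simpa [pvAFold, hp, hg] using hs, ?_⟩
        simp [hp, hg, hl, String.toList_push]

-- pvAFind returns none iff no entry satisfies the condition
theorem pvFindNone (leader_pos : Int) (arr : List (Option Int × Option Int))
    (h : List.findIdx? (pvCond leader_pos) arr = none) : pvAFind leader_pos arr = none := by
  induction arr with
  | nil => rfl
  | cons p rest ih =>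
    rw [List.findIdx?_cons] at h
    by_cases hc : pvCond leader_pos p
    · simp [hc] at h
    · simp only [hc, Bool.false_eq_true, if_false, Option.map_eq_none_iff] at h
      simpa [pvAFind, hc] using ih h

-- pvAFind at the first matching index: the found element, and pos_arr.index re-finds the same index
theorem pvFindSome (leader_pos : Int) (arr : List (Option Int × Option Int)) :
    ∀ j, List.findIdx? (pvCond leader_pos) arr = some j →
      ∃ h : j < arr.length,
        pvAFind leader_pos arr = some arr[j] ∧
        PySem.List.index? arr arr[j] = some j ∧
        pvCond leader_pos arr[j] = true := by
  induction arr with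
  | nil => intro j h; simp at h
  | cons p rest ih =>
    intro j h
    rw [List.findIdx?_cons] at h
    by_cases hc : pvCond leader_pos p
    · simp only [hc, if_true, Option.some.injEq] at h
      subst h
      exact ⟨by simp, by simp [pvAFind, hc], by simpa using PySem.List.index?_cons_self p rest, by simpa using hc⟩
    · simp only [hc, Bool.false_eq_true, if_false, Option.map_eq_some_iff] at h
      obtain ⟨j', hj', rfl⟩ := h
      obtain ⟨hlt, hfind, hidx, hcond⟩ := ih j' hj'
      have hne : p ≠ rest[j'] := by
        intro he; rw [he] at hc; exact hc (by simpa using hcond)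
      refine ⟨by simpa using Nat.succ_lt_succ hlt, ?_, ?_, by simpa using hcond⟩
      · simp only [List.getElem_cons_succ]
        simpa [pvAFind, hc] using hfind
      · simp only [List.getElem_cons_succ]
        rw [PySem.List.index?_cons_of_ne rest hne, hidx]
        rfl

-- the converse: findIdx? = some j describes the first match
theorem pvFirstOfFindIdx (leader_pos : Int) (arr : List (Option Int × Option Int)) :
    ∀ j, List.findIdx? (pvCond leader_pos) arr = some j →
      j < arr.length ∧ pvCond leader_pos (arr.getD j (none, none)) = true ∧
      ∀ k, k < j → pvCond leader_pos (arr.getD k (none, none)) = false := by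
  induction arr with
  | nil => intro j h; simp at h
  | cons p rest ih =>
    intro j h
    rw [List.findIdx?_cons] at h
    by_cases hc : pvCond leader_pos p
    · simp only [hc, if_true, Option.some.injEq] at h
      subst h
      exact ⟨by simp, by simpa using hc, fun k hk => absurd hk (by omega)⟩
    · simp only [hc, Bool.false_eq_true, if_false, Option.map_eq_some_iff] at h
      obtain ⟨j', hj', rfl⟩ := h
      obtain ⟨hlt, hcond, hmin⟩ := ih j' hj'
      refine ⟨by simpa using Nat.succ_lt_succ hlt, by simpa using hcond, ?_⟩
      intro k hk
      cases k with
      | zero => simpa using (by simpa using hc : pvCond leader_pos p = false)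
      | succ k' => simpa using hmin k' (by omega)

-- B's scan = find the first match, then take from there
theorem pvScanEq (seg : List Char) (leader_pos mut_len : Int)
    (arr : List (Option Int × Option Int)) :
    pvBScan seg leader_pos mut_len arr =
      (match List.findIdx? (pvCond leader_pos) arr with
       | none => none
       | some j => pvBTake seg mut_len "" (arr.drop j)) := by
  induction arr with
  | nil => rfl
  | cons p rest ih =>
    rw [List.findIdx?_cons]
    by_cases hc : pvCond leader_pos p
    · simp [pvBScan, hc]
    · rw [pvBScan, if_neg (by simp [hc]), ih]
      cases hfr : List.findIdx? (pvCond leader_pos) rest with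
      | none => simp [hc]
      | some j' => simp [hc]

-- the slice A folds over, as drop/take (j = the first-match index, j < arr.length)
theorem pvWindowEq {α : Type} (arr : List α) (j : Nat) (ml : Int) (hj : j < arr.length) :
    PySem.List.slice arr (some (j : Int)) (some ((j : Int) + ml)) =
      (arr.drop j).take (PySem.List.clampIdx arr.length ((j : Int) + ml) - j) := by
  rw [pvSliceDef]
  have h1 : PySem.List.clampIdx arr.length (j : Int) = j := by
    rw [pvClampDef]; split <;> omega
  rw [h1]

-- main agreement lemma, assuming a first match at j
theorem pvAgree (seg_seq : String) (leader_pos mut_len : Int)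
    (arr : List (Option Int × Option Int)) (j : Nat)
    (hfind : List.findIdx? (pvCond leader_pos) arr = some j)
    (hnD : ¬ D_mut_locator seg_seq leader_pos mut_len arr) :
    mut_locator seg_seq leader_pos mut_len arr =
      mut_locator_alt seg_seq leader_pos mut_len arr := by
  obtain ⟨hj, hA, hidx, _⟩ := pvFindSome leader_pos arr j hfind
  rw [mut_locator, hA]
  rw [mut_locator_alt, pvScanEq, hfind]
  simp only [hidx]
  rw [pvWindowEq arr j mut_len hj]
  by_cases hml : 0 ≤ mut_len
  · -- positive length: both walk the same mut_len-entry window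
    rw [← pvTakePos seg_seq.toList (arr.drop j) mut_len "" hml]
    congr 1
    rw [List.take_eq_take_iff]
    rw [pvClampDef]
    simp only [List.length_drop]
    split <;> omega
  · -- negative length: B returns '', and A's window holds no read position (¬ D_)
    rw [pvTakeNonpos seg_seq.toList mut_len "" (arr.drop j) (by omega)]
    apply pvFoldSkip
    intro m hm
    by_contra hne
    -- m sits at absolute index j + u inside the wrapped window: contradicts ¬ D_
    obtain ⟨u, hu, hmu⟩ := List.getElem_of_mem hm
    have hulen : u < ((arr.drop j).take
        (PySem.List.clampIdx arr.length ((j : Int) + mut_len) - j)).length := hu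
    simp only [List.length_take, List.length_drop] at hulen
    by_cases hjml : (j : Int) + mut_len < 0
    · have hclamp : PySem.List.clampIdx arr.length ((j : Int) + mut_len) =
          ((j : Int) + mut_len + arr.length).toNat := by rw [pvClampDef]; simp [hjml]
      have hmw : m ∈ (arr.drop j).take ((arr.length : Int) + mut_len).toNat := by
        rw [show (arr.drop j).take ((arr.length : Int) + mut_len).toNat =
            (arr.drop j).take (PySem.List.clampIdx arr.length ((j : Int) + mut_len) - j) from by
          rw [List.take_eq_take_iff, hclamp]; simp only [List.length_drop]; omega]
        exact hm
      apply hnD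
      rw [D_mut_locator, hfind, Option.any_some, Bool.and_eq_true]
      refine ⟨by simpa using hjml, List.any_eq_true.mpr ⟨m, hmw, ?_⟩⟩
      simpa using Option.isSome_iff_ne_none.mpr hne
    · -- stop index ≥ 0 but length negative: window is empty, no members
      have : PySem.List.clampIdx arr.length ((j : Int) + mut_len) ≤ j := by
        rw [pvClampDef]; split <;> omega
      omega

-- ===== VERDICT (by name: the statement is the Claim_ definition above) =====
theorem mut_locator_spec : Claim_unchanged_mut_locator := by
  intro seg_seq leader_pos mut_len pos_arr _ _ hnD
  cases hfind : List.findIdx? (pvCond leader_pos) pos_arr with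
  | none =>
    rw [mut_locator, pvFindNone leader_pos pos_arr hfind]
    rw [mut_locator_alt, pvScanEq, hfind]
  | some j => exact pvAgree seg_seq leader_pos mut_len pos_arr j hfind hnD

theorem mut_locator_changed : Claim_changed_mut_locator := by
  unfold Claim_changed_mut_locator; decide

theorem mut_locator_tight : Claim_exact_mut_locator := by
  intro seg_seq leader_pos mut_len pos_arr _ hpre hD
  rw [D_mut_locator] at hD
  cases hfind : List.findIdx? (pvCond leader_pos) pos_arr with
  | none => rw [hfind] at hD; simp at hD
  | some j =>
  rw [hfind, Option.any_some, Bool.and_eq_true, decide_eq_true_eq] at hD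
  obtain ⟨hjml, hany⟩ := hD
  obtain ⟨m0, hm0, hm0s⟩ := List.any_eq_true.mp hany
  obtain ⟨hj, hcond, hmin⟩ := pvFirstOfFindIdx leader_pos pos_arr j hfind
  obtain ⟨hj', hA, hidx, _⟩ := pvFindSome leader_pos pos_arr j hfind
  have hwin := hpre j hj hcond hmin
  have hclamp : PySem.List.clampIdx pos_arr.length ((j : Int) + mut_len) =
      ((j : Int) + mut_len + pos_arr.length).toNat := by rw [pvClampDef]; simp [hjml]
  rw [show (pos_arr.drop j).take ((pos_arr.length : Int) + mut_len).toNat =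
      (pos_arr.drop j).take (PySem.List.clampIdx pos_arr.length ((j : Int) + mut_len) - j) from by
    rw [List.take_eq_take_iff, hclamp]; simp only [List.length_drop]; omega] at hm0
  -- A's value: fold over the wrapped window, every position gettable
  rw [mut_locator, hA]
  simp only [hidx]
  rw [pvWindowEq pos_arr j mut_len hj']
  have hall : ∀ m ∈ (pos_arr.drop j).take
      (PySem.List.clampIdx pos_arr.length ((j : Int) + mut_len) - j),
      ∀ i, m.1 = some i → (PySem.List.pyGet? seg_seq.toList i).isSome = true := by
    intro m hm i hi
    obtain ⟨u, hu, hmu⟩ := List.getElem_of_mem hm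
    have hulen := hu
    simp only [List.length_take, List.length_drop] at hulen
    have hju : j + u < pos_arr.length := by omega
    have hmval : m = pos_arr[j + u] := by rw [← hmu, List.getElem_take, List.getElem_drop]
    have hok := (List.all_eq_true.mp hwin) (j + u) (List.mem_range.mpr hju)
    rw [Bool.or_eq_true] at hok
    rcases hok with hbad | hgood
    · exfalso
      rw [Bool.not_eq_eq_eq_not, Bool.not_true, Bool.and_eq_false_iff] at hbad
      rcases hbad with h1 | h1 <;> rw [decide_eq_false_iff_not] at h1
      · omega
      · exact h1 (by omega)
    · have : (pos_arr.getD (j + u) (none, none)).1 = some i := by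
        rw [List.getD_eq_getElem?_getD, List.getElem?_eq_getElem hju, ← hmval]
        simpa using hi
      rw [this] at hgood
      simp only [Option.all_some, Bool.and_eq_true, decide_eq_true_eq] at hgood
      have : PySem.List.pyGet? seg_seq.toList i ≠ none := by
        intro hno
        rw [PySem.List.pyGet?_eq_none_iff] at hno
        exact hno (by unfold PySem.Raise.InRange; constructor <;> omega)
      cases hg : PySem.List.pyGet? seg_seq.toList i with
      | none => exact absurd hg this
      | some c => rfl
  obtain ⟨s, hs, hsl⟩ := pvFoldChars seg_seq.toList _ "" hall
  rw [hs]
  -- B's value: ''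
  rw [mut_locator_alt, pvScanEq, hfind]
  simp only [pvTakeNonpos seg_seq.toList mut_len "" (pos_arr.drop j) (by omega : mut_len ≤ 0)]
  -- they differ: s contains the character at m0's read position
  intro heq
  have hseq : s = "" := by simpa using heq
  rw [hseq] at hsl
  have hnil := List.self_eq_append_right.mp hsl
  have hfne := List.filterMap_eq_nil_iff.mp hnil _ hm0
  obtain ⟨i, hi⟩ := Option.isSome_iff_exists.mp (by simpa using hm0s)
  have hget := hall _ hm0 i hi
  rw [hi] at hfne
  simp only [Option.bind_some] at hfne
  rw [hfne] at hget
  simp at hget
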